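-- pv_equiv track=rewrite | github.com/quaziashfaq/programming | timus/vol3/1209-01.py | generate_array
-- ===== SOURCE A (Python) =====
-- def generate_array(n):
--     a = [0] * n
--     a[0] = 1
--     i = 1
--
--     '''
--     Here the sequence is 1, 10, 100, 1000, 10000, 100000, ...
--     The length of each number is as follows: 1, 2, 3, 4, 5, 6, ...
--     So the position of each 1 is as follows: 1, 2, 4, 7, 11, 16, 22
--     Therefore we are adding the length of each number to the previous 1's positional value.
--     a[0] = 1 --> this is the 1st one
--     a[1] = a[0] + 1 = 2
--     a[2] = a[1] + 2 = 4
--     a[3] = a[2] + 3 = 7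
--     a[4] = a[3] + 4 = 11
--     '''
--     while i < n:
--         a[i] = a[i-1] + i
--         i += 1
--     return a
-- ===== SOURCE B (Python) =====
-- def generate_array(n):
--     return [1 + i * (i + 1) // 2 for i in range(n)]
-- ===== Notes on version B (the rewrite author's own statement) =====
-- stated objective: simpler
-- what changed: B builds the list as a single comprehension computing each position independently from its index by the closed form 1 + i*(i+1)//2, instead of allocating [0]*n and filling it in place by the recurrence a[i] = a[i-1] + i.
import Mathlib
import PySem

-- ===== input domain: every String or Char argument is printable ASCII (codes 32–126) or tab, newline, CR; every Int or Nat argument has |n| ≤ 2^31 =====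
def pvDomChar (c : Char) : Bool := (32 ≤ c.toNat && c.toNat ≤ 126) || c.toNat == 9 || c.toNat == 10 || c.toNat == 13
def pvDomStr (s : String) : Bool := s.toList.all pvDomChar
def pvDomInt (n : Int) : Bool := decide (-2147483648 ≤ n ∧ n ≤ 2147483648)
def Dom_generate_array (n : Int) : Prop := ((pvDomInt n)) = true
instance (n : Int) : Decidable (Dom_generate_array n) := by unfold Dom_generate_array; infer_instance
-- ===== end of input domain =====

-- B builds the list as one comprehension from the closed form 1 + i*(i+1)//2 per index,
-- instead of A's allocate-then-fill recurrence a[i] = a[i-1] + i (objective: simpler).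

-- ===== PORT A =====
-- a = [0]*n; a[0] = 1; while i < n: a[i] = a[i-1] + i; i += 1
def generate_array (n : Int) : List Int :=
  let a := PySem.List.pySetD (List.replicate n.toNat 0) 0 1
  (PySem.List.pyRange 1 n 1).foldl
    (fun a i => PySem.List.pySetD a i (PySem.List.pyGetD a (i - 1) 0 + i)) a

-- ===== PORT B =====
-- return [1 + i*(i+1)//2 for i in range(n)]
def generate_array_alt (n : Int) : List Int :=
  (PySem.List.pyRange 0 n 1).map (fun i => 1 + PySem.Int.floordiv (i * (i + 1)) 2)

-- ===== PRECONDITION & SPEC =====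
-- Pre_ excludes n ≤ 0, where Python A raises IndexError at a[0] = 1.
def Pre_generate_array (n : Int) : Prop := 1 ≤ n
instance (n : Int) : Decidable (Pre_generate_array n) := by unfold Pre_generate_array; infer_instance
def pvWitness_generate_array : Int := (5)

def Spec_generate_array (n : Int) (out : List Int) : Prop := out = generate_array_alt n
instance (n : Int) (out : List Int) : Decidable (Spec_generate_array n out) := by unfold Spec_generate_array; infer_instance

-- ===== CLAIM (what is proved, stated in full; the proofs are below) =====
def Claim_equal_generate_array : Prop := ∀ (n : Int), Dom_generate_array n → Pre_generate_array n → Spec_generate_array n (generate_array n)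

-- ===== LEMMAS AND PROOFS =====

/-- The closed-form value at index `k`. -/
def pvC (k : Nat) : Int := 1 + ((k * (k + 1) / 2 : Nat) : Int)

/-- The loop state after positions `0..j-1` have been filled, list length `m`. -/
def pvState (j m : Nat) : List Int := (List.range j).map pvC ++ List.replicate (m - j) 0

lemma pvC_step (j : Nat) (hj : 1 ≤ j) : pvC (j - 1) + (j : Int) = pvC j := by
  obtain ⟨k, rfl⟩ : ∃ k, j = k + 1 := ⟨j - 1, by omega⟩
  unfold pvC
  have h1 : (k + 1) * (k + 1 + 1) = k * (k + 1) + 2 * (k + 1) := by ring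
  have h2 : (k + 1 - 1) * (k + 1 - 1 + 1) = k * (k + 1) := by simp
  have h3 : (k * (k + 1) + 2 * (k + 1)) / 2 = k * (k + 1) / 2 + (k + 1) := by omega
  rw [h1, h2, h3]
  push_cast
  ring

lemma pvState_set (j m : Nat) (hj : j < m) (v : Int) (hv : v = pvC j) :
    (pvState j m).set j v = pvState (j + 1) m := by
  subst hv
  unfold pvState
  have hlen : ((List.range j).map pvC).length = j := by simp
  have hrep : List.replicate (m - j) (0 : Int) = 0 :: List.replicate (m - (j + 1)) 0 := by
    have : m - j = (m - (j + 1)) + 1 := by omega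
    rw [this, List.replicate_succ]
  rw [hrep, List.set_append_right _ _ (by omega), List.range_succ, List.map_append]
  simp [hlen]

lemma pvState_get (j m : Nat) (hj : 1 ≤ j) (_hjm : j ≤ m) :
    PySem.List.pyGetD (pvState j m) ((j : Int) - 1) 0 = pvC (j - 1) := by
  have hcast : ((j : Int) - 1) = ((j - 1 : Nat) : Int) := by omega
  rw [hcast, PySem.List.pyGetD_natCast]
  unfold pvState
  rw [List.getD_append _ _ _ _ (by simp; omega)]
  simp [List.getD_eq_getElem?_getD, List.getElem?_map, List.getElem?_range (show j - 1 < j by omega)]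

lemma loopA : ∀ (d j m : Nat), m = j + d → 1 ≤ j →
    (PySem.List.pyRange (j : Int) (m : Int) 1).foldl
      (fun a i => PySem.List.pySetD a i (PySem.List.pyGetD a (i - 1) 0 + i)) (pvState j m)
      = (List.range m).map pvC := by
  intro d
  induction d with
  | zero =>
    intro j m hm hj
    subst hm
    rw [PySem.List.pyRange_one_eq_nil (by omega)]
    simp [pvState]
  | succ d ih =>
    intro j m hm hj
    have hjm : j < m := by omega
    rw [PySem.List.pyRange_one_cons (by exact_mod_cast hjm)]
    rw [List.foldl_cons]
    rw [pvState_get j m hj (by omega)]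
    rw [show ((j : Int) + 1) = ((j + 1 : Nat) : Int) by push_cast; ring]
    rw [PySem.List.pySetD_natCast]
    rw [pvState_set j m hjm _ (by rw [pvC_step j hj])]
    exact ih (j + 1) m (by omega) (by omega)

lemma init_state (m : Nat) (hm : 1 ≤ m) :
    PySem.List.pySetD (List.replicate m (0 : Int)) 0 1 = pvState 1 m := by
  rw [PySem.List.pySetD_of_nonneg _ 1 (le_refl (0 : Int))]
  unfold pvState
  have h : List.replicate m (0 : Int) = 0 :: List.replicate (m - 1) 0 := by
    rw [← List.replicate_succ]
    congr 1
    omega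
  rw [h]
  simp [List.range_succ, pvC]

lemma altB (m : Nat) : generate_array_alt (m : Int) = (List.range m).map pvC := by
  unfold generate_array_alt
  rw [PySem.List.pyRange_one]
  simp only [sub_zero, Int.toNat_natCast, List.map_map]
  refine List.map_congr_left (fun k _ => ?_)
  simp only [Function.comp, zero_add]
  rw [show ((k : Int) * ((k : Int) + 1)) = ((k * (k + 1) : Nat) : Int) by push_cast; ring]
  have h2 : PySem.Int.floordiv ((k * (k + 1) : Nat) : Int) 2 = ((k * (k + 1) / 2 : Nat) : Int) :=
    by exact_mod_cast PySem.Int.floordiv_natCast (k * (k + 1)) 2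
  rw [h2]
  rfl

-- ===== VERDICT (by name: the statement is the Claim_ definition above) =====
theorem generate_array_spec : Claim_equal_generate_array := by
  intro n _ hn
  unfold Pre_generate_array at hn
  obtain ⟨m, rfl⟩ := Int.eq_ofNat_of_zero_le (by omega : (0 : Int) ≤ n)
  have hm : 1 ≤ m := by exact_mod_cast hn
  unfold Spec_generate_array generate_array
  simp only [Int.toNat_natCast]
  rw [init_state m hm, altB m]
  exact loopA (m - 1) 1 m (by omega) (by omega)
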